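-- pv_equiv track=rewrite | github.com/riscv/riscv-arch-test | working-testplans/process_norm_rules.py | extract_cp_definition
-- ===== SOURCE A (Python) =====
-- def extract_cp_definition(adoc_text: str, cp_name: str) -> str:
--     """Extract a coverpoint's definition line from the adoc table."""
--     # Look for |cp_name| or |cmp_name| or |cr_name| pattern in the table
--     for line in adoc_text.split("\n"):
--         if f"|{cp_name}|" in line:
--             return line.strip().strip("|").strip()
--     # Try partial match (the column name may have variant suffix stripped)
--     base_name = cp_name.split("_")[0] + "_" + "_".join(cp_name.split("_")[1:])
--     for line in adoc_text.split("\n"):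
--         if f"|{base_name}|" in line:
--             return line.strip().strip("|").strip()
--     return f"(No definition found for {cp_name} in v-coverpoints.adoc)"
-- ===== SOURCE B (Python) =====
-- def extract_cp_definition(adoc_text: str, cp_name: str) -> str:
--     """Extract a coverpoint's definition line from the adoc table (single pass)."""
--     parts = cp_name.split("_")
--     base_name = parts[0] + "_" + "_".join(parts[1:])
--     exact_pat = f"|{cp_name}|"
--     base_pat = f"|{base_name}|"
--     exact = None
--     base = None
--     for line in adoc_text.split("\n"):
--         if exact is None and exact_pat in line:
--             exact = line.strip().strip("|").strip()
--         if base is None and base_pat in line: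
--             base = line.strip().strip("|").strip()
--     if exact is not None:
--         return exact
--     if base is not None:
--         return base
--     return f"(No definition found for {cp_name} in v-coverpoints.adoc)"
-- ===== Notes on version B (the rewrite author's own statement) =====
-- stated objective: alternative
-- what changed: A's two sequential scans of the lines (exact pattern first, then the base-name pattern) are collapsed into one pass that maintains two first-match slots and picks the exact-match slot with priority.
import Mathlib
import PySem

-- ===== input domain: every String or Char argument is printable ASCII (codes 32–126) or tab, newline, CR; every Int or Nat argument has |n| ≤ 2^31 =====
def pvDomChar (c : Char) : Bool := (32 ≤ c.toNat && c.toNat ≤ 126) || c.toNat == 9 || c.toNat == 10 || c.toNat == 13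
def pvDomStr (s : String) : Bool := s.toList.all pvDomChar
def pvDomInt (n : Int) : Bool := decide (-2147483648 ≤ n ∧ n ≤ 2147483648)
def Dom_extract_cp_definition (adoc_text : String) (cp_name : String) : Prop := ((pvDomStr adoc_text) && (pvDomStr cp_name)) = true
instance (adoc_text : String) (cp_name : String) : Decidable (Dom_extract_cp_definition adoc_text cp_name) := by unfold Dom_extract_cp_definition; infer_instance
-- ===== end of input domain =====

-- B collapses A's two sequential scans into ONE pass keeping two first-match slots; same result.

-- ===== PORT A =====
-- line.strip().strip("|").strip()  (shared by both Pythons verbatim)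
def pvClean (line : String) : String :=
  PySem.Str.strip (PySem.Str.stripChars (PySem.Str.strip line) "|")

-- A's 'for line in lines: if f"|{pat}|" in line: return …' loop (early return = recursion)
def pvLoopA (pat : String) : List String → Option String
  | [] => none
  | l :: ls =>
      if PySem.Str.isIn ("|" ++ pat ++ "|") l then some (pvClean l) else pvLoopA pat ls

def extract_cp_definition (adoc_text : String) (cp_name : String) : String :=
  let lines := (PySem.Str.split? adoc_text "\n").getD []
  match pvLoopA cp_name lines with
  | some r => r
  | none =>
    -- cp_name.split("_")[0] is safe: split with a nonempty sep is never empty (headD "" unreachable)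
    let parts := (PySem.Str.split? cp_name "_").getD []
    let base_name := parts.headD "" ++ "_" ++ PySem.Str.join "_" parts.tail
    match pvLoopA base_name lines with
    | some r => r
    | none => "(No definition found for " ++ cp_name ++ " in v-coverpoints.adoc)"

-- ===== PORT B =====
-- one step of B's single loop over the lines, updating the two slots
def pvStepB (exact_pat base_pat : String) (s : Option String × Option String) (line : String) :
    Option String × Option String :=
  ( if s.1.isNone && PySem.Str.isIn exact_pat line then some (pvClean line) else s.1,
    if s.2.isNone && PySem.Str.isIn base_pat line then some (pvClean line) else s.2 )

def extract_cp_definition_alt (adoc_text : String) (cp_name : String) : String :=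
  let parts := (PySem.Str.split? cp_name "_").getD []
  let base_name := parts.headD "" ++ "_" ++ PySem.Str.join "_" parts.tail
  let exact_pat := "|" ++ cp_name ++ "|"
  let base_pat := "|" ++ base_name ++ "|"
  let st := ((PySem.Str.split? adoc_text "\n").getD []).foldl (pvStepB exact_pat base_pat) (none, none)
  match st.1 with
  | some r => r
  | none =>
    match st.2 with
    | some r => r
    | none => "(No definition found for " ++ cp_name ++ " in v-coverpoints.adoc)"

-- ===== PRECONDITION & SPEC =====
def Spec_extract_cp_definition (adoc_text : String) (cp_name : String) (out : String) : Prop := out = extract_cp_definition_alt adoc_text cp_name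
instance (adoc_text : String) (cp_name : String) (out : String) : Decidable (Spec_extract_cp_definition adoc_text cp_name out) := by unfold Spec_extract_cp_definition; infer_instance

-- ===== CLAIM (what is proved, stated in full; the proofs are below) =====
def Claim_equal_extract_cp_definition : Prop := ∀ (adoc_text : String) (cp_name : String), Dom_extract_cp_definition adoc_text cp_name → Spec_extract_cp_definition adoc_text cp_name (extract_cp_definition adoc_text cp_name)

-- ===== LEMMAS AND PROOFS =====

-- proof-only helper: first line containing pattern p, cleaned
def pvFirst (p : String) : List String → Option String
  | [] => none
  | l :: ls => if PySem.Str.isIn p l then some (pvClean l) else pvFirst p ls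

-- A's scan with name pat is the first match of the wrapped pattern
theorem pvLoopA_eq_first (pat : String) (ls : List String) :
    pvLoopA pat ls = pvFirst ("|" ++ pat ++ "|") ls := by
  induction ls with
  | nil => rfl
  | cons l ls ih => simp [pvLoopA, pvFirst, ih]

-- B's fold computes, in each component, the first match unless the slot is already filled
theorem pvFoldB_spec (pe pb : String) (ls : List String) (a b : Option String) :
    ls.foldl (pvStepB pe pb) (a, b) =
      (a.rec (pvFirst pe ls) (fun x => some x), b.rec (pvFirst pb ls) (fun x => some x)) := by
  induction ls generalizing a b with
  | nil => cases a <;> cases b <;> rfl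
  | cons l ls ih =>
      simp only [List.foldl_cons, pvStepB]
      cases a <;> cases b <;> simp [ih, pvFirst] <;> split_ifs <;> simp

-- ===== VERDICT (by name: the statement is the Claim_ definition above) =====
theorem extract_cp_definition_spec : Claim_equal_extract_cp_definition := by
  intro adoc_text cp_name _
  unfold Spec_extract_cp_definition extract_cp_definition extract_cp_definition_alt
  simp only [pvFoldB_spec, pvLoopA_eq_first]
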